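-- pv_equiv track=rewrite | github.com/MuLingMing/--TCR----------- | DeepCAT/init.py | InsertGap
-- ===== SOURCE A (Python) =====
-- def InsertGap(Seq, n):
--     # Insert n gaps to Seq; n<=2
--     if n == 0:
--         return [Seq]
--     ns = len(Seq)
--     SeqList = []
--     if n == 1:
--         for kk in range(0, ns + 1):
--             SeqNew = Seq[0:kk] + "-" + Seq[kk:]
--             SeqList.append(SeqNew)
--     if n == 2:
--         for kk in range(0, ns + 1):
--             SeqNew = Seq[0:kk] + "-" + Seq[kk:]
--             for jj in range(0, ns + 2):
--                 SeqNew0 = SeqNew[0:jj] + "-" + SeqNew[jj:]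
--                 SeqList.append(SeqNew0)
--     return SeqList
-- ===== SOURCE B (Python) =====
-- def InsertGap(Seq, n):
--     # Insert n gaps into Seq iteratively; A's contract is n <= 2 (its comment),
--     # and for n outside {0,1,2} it returns [] -- so does the guard here.
--     if n < 0 or n > 2:
--         return []
--     result = [Seq]
--     for _ in range(n):
--         result = [s[:j] + "-" + s[j:] for s in result for j in range(len(s) + 1)]
--     return result
-- ===== Notes on version B (the rewrite author's own statement) =====
-- stated objective: simpler
-- what changed: Replaces A's two hard-coded loop nests for n==1 and n==2 by a single iterative pass repeated n times (each pass replaces every string with all its single-gap insertions, outer loop over strings, inner over positions), with a guard returning [] for n outside {0,1,2} exactly as A does.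
import Mathlib
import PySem

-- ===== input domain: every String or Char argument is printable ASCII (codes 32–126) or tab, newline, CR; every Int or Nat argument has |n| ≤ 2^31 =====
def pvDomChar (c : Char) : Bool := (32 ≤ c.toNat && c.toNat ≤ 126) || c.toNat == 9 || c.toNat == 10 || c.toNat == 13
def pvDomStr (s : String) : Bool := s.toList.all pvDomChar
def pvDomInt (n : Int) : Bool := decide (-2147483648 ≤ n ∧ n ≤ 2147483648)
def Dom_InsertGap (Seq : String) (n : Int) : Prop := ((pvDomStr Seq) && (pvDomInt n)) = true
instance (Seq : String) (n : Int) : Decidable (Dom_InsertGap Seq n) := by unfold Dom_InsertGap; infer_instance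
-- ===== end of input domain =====

-- B replaces A's two hard-coded n==1 / n==2 loop nests by one iterative pass
-- ('repeat n times: insert one gap at every position of every current string'),
-- guarded for n outside {0,1,2} where A returns [] (A's stated contract is n <= 2). Objective: simpler.

-- ===== PORT A =====
-- s[0:k] + "-" + s[k:]  (A's loop body, on code points)
def aGap (s : List Char) (k : Int) : List Char :=
  PySem.List.slice s (some 0) (some k) ++ ['-'] ++ PySem.List.slice s (some k) none

def InsertGap (Seq : String) (n : Int) : List String :=
  if n == 0 then [Seq]
  else
    let ns : Int := PySem.Str.len Seq
    let SeqList : List String := []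
    let SeqList :=
      if n == 1 then
        (PySem.List.pyRange 0 (ns + 1) 1).foldl
          (fun acc kk => acc ++ [String.ofList (aGap Seq.toList kk)]) SeqList
      else SeqList
    let SeqList :=
      if n == 2 then
        (PySem.List.pyRange 0 (ns + 1) 1).foldl
          (fun acc kk =>
            let SeqNew := aGap Seq.toList kk
            (PySem.List.pyRange 0 (ns + 2) 1).foldl
              (fun acc2 jj => acc2 ++ [String.ofList (aGap SeqNew jj)]) acc) SeqList
      else SeqList
    SeqList

-- ===== PORT B =====
-- s[:j] + "-" + s[j:]  (B's comprehension body, on code points)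
def bGap (s : List Char) (j : Int) : List Char :=
  PySem.List.slice s none (some j) ++ ['-'] ++ PySem.List.slice s (some j) none

def InsertGap_alt (Seq : String) (n : Int) : List String :=
  if n < 0 || n > 2 then []
  else
    (PySem.List.pyRange 0 n 1).foldl
      (fun result _ =>
        result.flatMap (fun s =>
          (PySem.List.pyRange 0 (PySem.Str.len s + 1) 1).map
            (fun j => String.ofList (bGap s.toList j))))
      [Seq]

-- ===== PRECONDITION & SPEC =====
def Spec_InsertGap (Seq : String) (n : Int) (out : List String) : Prop := out = InsertGap_alt Seq n
instance (Seq : String) (n : Int) (out : List String) : Decidable (Spec_InsertGap Seq n out) := by unfold Spec_InsertGap; infer_instance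

-- ===== CLAIM (what is proved, stated in full; the proofs are below) =====
def Claim_equal_InsertGap : Prop := ∀ (Seq : String) (n : Int), Dom_InsertGap Seq n → Spec_InsertGap Seq n (InsertGap Seq n)

-- ===== LEMMAS AND PROOFS =====

-- A's Seq[0:k] + "-" + Seq[k:] is B's Seq[:j] + "-" + Seq[j:]
theorem aGap_eq_bGap (s : List Char) (k : Int) : aGap s k = bGap s k := by
  simp [aGap, bGap]

-- inserting one gap at a (clamped) position grows the length by one
theorem length_bGap (s : List Char) (k : Nat) :
    (bGap s (k : Int)).length = s.length + 1 := by
  simp [bGap, PySem.List.slice_to_natCast, PySem.List.slice_from_natCast]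

theorem InsertGap_eq_alt (Seq : String) (n : Int) :
    InsertGap Seq n = InsertGap_alt Seq n := by
  by_cases h0 : n = 0
  · -- n == 0: both return [Seq]
    have hr0 : PySem.List.pyRange 0 0 1 = [] := by decide
    subst h0; simp [InsertGap, InsertGap_alt, hr0]
  by_cases h1 : n = 1
  · -- n == 1: A's single loop is B's one insertion pass over [Seq]
    subst h1
    simp only [InsertGap, InsertGap_alt]
    norm_num
    have hr1 : PySem.List.pyRange 0 1 1 = [0] := by decide
    rw [hr1, List.foldl_cons, List.foldl_nil, List.flatMap_singleton]
    simp [aGap_eq_bGap, ← List.flatMap_def, ← List.map_eq_flatMap]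
  by_cases h2 : n = 2
  · -- n == 2: A's nested kk/jj loops are B's two insertion passes
    subst h2
    simp only [InsertGap, InsertGap_alt]
    norm_num
    have hr2 : PySem.List.pyRange 0 2 1 = [0, 1] := by decide
    rw [hr2, List.foldl_cons, List.foldl_cons, List.foldl_nil, List.flatMap_singleton]
    simp only [← List.flatMap_def, ← List.map_eq_flatMap, List.flatMap_map]
    apply List.flatMap_congr
    intro kk hkk
    rw [PySem.List.mem_pyRange_one] at hkk
    obtain ⟨k, rfl⟩ : ∃ k : Nat, kk = (k : Int) := ⟨kk.toNat, (Int.toNat_of_nonneg hkk.1).symm⟩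
    have hlen := length_bGap Seq.toList k
    simp only [aGap_eq_bGap, String.toList_ofList, String.length_ofList, hlen,
      String.length_toList]
    push_cast
    have hcast : ((Seq.length : Int) + 1 + 1) = (Seq.length : Int) + 2 := by ring
    rw [hcast]
  · -- n outside {0,1,2}: A falls through all branches with [], B's guard yields []
    have hg : (n < 0 || n > 2) = true := by
      rcases (by omega : n < 0 ∨ 2 < n) with h | h <;> simp [h]
    simp [InsertGap, InsertGap_alt, h0, h1, h2, hg]

-- ===== VERDICT (by name: the statement is the Claim_ definition above) =====
theorem InsertGap_spec : Claim_equal_InsertGap := by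
  intro Seq n _
  unfold Spec_InsertGap
  exact InsertGap_eq_alt Seq n
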